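-- pv_equiv track=rewrite | github.com/daniel-reich/ubiquitous-fiesta | tjMNAEgkNvM5eyEqJ_7.py | unique_abbrev
-- ===== SOURCE A (Python) =====
-- def unique_abbrev(abbs, words):
--   for i in abbs:
--     count = 0
--     for j in words:
--       if j.startswith(i):
--         count += 1
--     if count > 1:
--       return False
--   return True
-- ===== SOURCE B (Python) =====
-- def unique_abbrev(abbs, words):
--     cnt = {}
--     for w in words:
--         for k in range(len(w) + 1):
--             p = w[:k]
--             cnt[p] = cnt.get(p, 0) + 1
--     return all(cnt.get(a, 0) <= 1 for a in abbs)
-- ===== Notes on version B (the rewrite author's own statement) =====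
-- stated objective: alternative
-- what changed: B builds a hash map counting every prefix of every word in one pass, then answers each abbreviation by a single dictionary lookup, removing A's inner scan over words per abbreviation.
import Mathlib
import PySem

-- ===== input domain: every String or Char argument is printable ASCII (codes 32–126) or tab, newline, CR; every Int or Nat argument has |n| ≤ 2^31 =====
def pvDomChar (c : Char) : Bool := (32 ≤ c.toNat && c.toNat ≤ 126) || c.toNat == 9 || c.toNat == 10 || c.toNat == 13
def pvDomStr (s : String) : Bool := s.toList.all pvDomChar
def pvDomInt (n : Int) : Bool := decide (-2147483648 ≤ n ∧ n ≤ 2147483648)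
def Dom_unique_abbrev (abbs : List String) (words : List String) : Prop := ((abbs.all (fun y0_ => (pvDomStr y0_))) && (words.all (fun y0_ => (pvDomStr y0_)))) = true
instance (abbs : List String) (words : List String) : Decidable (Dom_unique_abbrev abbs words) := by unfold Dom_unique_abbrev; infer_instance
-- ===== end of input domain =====

-- B replaces A's per-abbreviation scan over all words by a prefix-count dictionary
-- built once from the words, answering each abbreviation with one lookup (alternative decomposition).

-- ===== PORT A =====
def unique_abbrev (abbs : List String) (words : List String) : Bool :=
  match abbs with
  | [] => true
  | i :: rest =>
    let count : Int :=
      words.foldl (fun c j => if PySem.Str.startswith j i then c + 1 else c) 0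
    if count > 1 then false else unique_abbrev rest words

-- ===== PORT B =====
-- cnt[w[:k]] += 1 for every word w and every k in range(len(w)+1)
def pvPrefCnt (words : List String) : PySem.Dict String Int :=
  words.foldl
    (fun cnt w =>
      (PySem.List.pyRange 0 (PySem.Str.len w + 1) 1).foldl
        (fun cnt k =>
          let p := PySem.Str.slice w none (some k)
          cnt.insert p (cnt.getD p 0 + 1))
        cnt)
    PySem.Dict.empty

def unique_abbrev_alt (abbs : List String) (words : List String) : Bool :=
  let cnt := pvPrefCnt words
  abbs.all (fun a => decide (cnt.getD a 0 ≤ 1))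

-- ===== PRECONDITION & SPEC =====
def Spec_unique_abbrev (abbs : List String) (words : List String) (out : Bool) : Prop := out = unique_abbrev_alt abbs words
instance (abbs : List String) (words : List String) (out : Bool) : Decidable (Spec_unique_abbrev abbs words out) := by unfold Spec_unique_abbrev; infer_instance

-- ===== CLAIM (what is proved, stated in full; the proofs are below) =====
def Claim_equal_unique_abbrev : Prop := ∀ (abbs : List String) (words : List String), Dom_unique_abbrev abbs words → Spec_unique_abbrev abbs words (unique_abbrev abbs words)

-- ===== LEMMAS AND PROOFS =====

-- among k = 0..len w there is exactly one k with w.take k = a when a is a prefix of w, none otherwise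
theorem pv_take_countP (w a : List Char) :
    (List.range (w.length + 1)).countP (fun k => decide (w.take k = a))
      = if a <+: w then 1 else 0 := by
  by_cases h : a <+: w
  · have hlen : a.length ≤ w.length := h.length_le
    have hc : ∀ k ∈ List.range (w.length + 1),
        decide (w.take k = a) = true ↔ (k == a.length) = true := by
      intro k hk
      simp only [List.mem_range] at hk
      simp only [decide_eq_true_eq, beq_iff_eq]
      constructor
      · intro he
        have := congrArg List.length he
        simpa [Nat.min_eq_left (by omega : k ≤ w.length)] using this
      · intro he
        subst he
        exact (List.prefix_iff_eq_take.mp h).symm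
    rw [List.countP_congr hc]
    have hcn : (List.range (w.length + 1)).countP (fun k => k == a.length)
        = (List.range (w.length + 1)).count a.length := by
      simp [List.count]
    rw [hcn, List.count_eq_one_of_mem (List.nodup_range) (by simp [List.mem_range]; omega)]
    simp [h]
  · rw [List.countP_eq_zero.mpr, if_neg h]
    intro k _ hk
    simp only [decide_eq_true_eq] at hk
    exact h (hk ▸ List.take_prefix k w)

-- the list of slices w[:k], k = 0..len w, counts a string exactly once iff it is a prefix
theorem pv_slice_count (w a : String) :
    List.count a ((PySem.List.pyRange 0 (PySem.Str.len w + 1) 1).map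
        (fun k => PySem.Str.slice w none (some k)))
      = if PySem.Str.startswith w a then 1 else 0 := by
  have hlen : PySem.Str.len w + 1 = ((w.toList.length + 1 : Nat) : Int) := by
    simp [PySem.Str.len_eq]
  rw [hlen, PySem.List.pyRange_zero_natCast, List.map_map, List.count, List.countP_map]
  have hbody : ∀ k ∈ List.range (w.toList.length + 1),
      ((fun x => x == a) ∘ (fun k => PySem.Str.slice w none (some k)) ∘ (fun k : Nat => (k : Int))) k = true
        ↔ decide (w.toList.take k = a.toList) = true := by
    intro k _
    simp only [Function.comp_apply, beq_iff_eq, decide_eq_true_eq]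
    constructor
    · intro he
      have := congrArg String.toList he
      simpa [PySem.Str.toList_slice, PySem.Chars.slice_eq_listSlice,
        PySem.List.slice_to_natCast] using this
    · intro he
      apply String.toList_inj.mp
      simpa [PySem.Str.toList_slice, PySem.Chars.slice_eq_listSlice,
        PySem.List.slice_to_natCast] using he
  rw [List.countP_congr hbody, pv_take_countP, PySem.Str.startswith_eq]
  by_cases h : a.toList <+: w.toList
  · rw [if_pos h, if_pos ((PySem.Chars.startswith_iff _ _).mpr h)]
  · rw [if_neg h, if_neg (by simpa [PySem.Chars.startswith_iff] using h)]

-- invariant of B's building loop: the dictionary counts, for every key, the words it prefixes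
theorem pv_cnt_getD (words : List String) (a : String) :
    ∀ d : PySem.Dict String Int,
      ((words.foldl
        (fun cnt w =>
          (PySem.List.pyRange 0 (PySem.Str.len w + 1) 1).foldl
            (fun cnt k =>
              let p := PySem.Str.slice w none (some k)
              cnt.insert p (cnt.getD p 0 + 1))
            cnt) d).getD a 0)
      = d.getD a 0 + (words.countP (fun w => PySem.Str.startswith w a) : Int) := by
  induction words with
  | nil => intro d; simp
  | cons w ws ih =>
    intro d
    rw [List.foldl_cons, ih]
    have hmap : ∀ (l : List Int) (d : PySem.Dict String Int),
        l.foldl (fun cnt k =>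
            let p := PySem.Str.slice w none (some k)
            cnt.insert p (cnt.getD p 0 + 1)) d
        = (l.map (fun k => PySem.Str.slice w none (some k))).foldl
            (fun cnt p => cnt.insert p (cnt.getD p 0 + 1)) d := by
      intro l d
      simp [List.foldl_map]
    have hinner :
        ((PySem.List.pyRange 0 (PySem.Str.len w + 1) 1).foldl
          (fun cnt k =>
            let p := PySem.Str.slice w none (some k)
            cnt.insert p (cnt.getD p 0 + 1)) d).getD a 0
        = d.getD a 0 + (if PySem.Str.startswith w a then 1 else 0 : Int) := by
      rw [hmap, PySem.Dict.getD_foldl_insert_add_one, pv_slice_count]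
      split_ifs <;> simp
    rw [hinner, List.countP_cons]
    split_ifs with h <;> push_cast <;> ring

-- A's inner loop is a countP
theorem pv_countA (words : List String) (i : String) :
    words.foldl (fun c j => if PySem.Str.startswith j i then c + 1 else c) (0 : Int)
      = (words.countP (fun j => PySem.Str.startswith j i) : Int) := by
  rw [PySem.List.foldl_count_if]; ring

theorem pv_main (abbs words : List String) :
    unique_abbrev abbs words = unique_abbrev_alt abbs words := by
  induction abbs with
  | nil => rfl
  | cons i rest ih =>
    have hcnt : (pvPrefCnt words).getD i 0
        = (words.countP (fun j => PySem.Str.startswith j i) : Int) := by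
      rw [pvPrefCnt, pv_cnt_getD]; simp
    have halt : unique_abbrev_alt (i :: rest) words
        = (decide ((pvPrefCnt words).getD i 0 ≤ 1) && unique_abbrev_alt rest words) := by
      simp only [unique_abbrev_alt, List.all_cons]
    rw [halt, hcnt]
    simp only [unique_abbrev, pv_countA]
    by_cases h : ((words.countP (fun j => PySem.Str.startswith j i) : Int)) > 1
    · rw [if_pos h]
      rw [decide_eq_false (by omega), Bool.false_and]
    · rw [if_neg h, ih]
      rw [decide_eq_true (by omega), Bool.true_and]

-- ===== VERDICT (by name: the statement is the Claim_ definition above) =====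
theorem unique_abbrev_spec : Claim_equal_unique_abbrev := by
  intro abbs words _
  unfold Spec_unique_abbrev
  exact pv_main abbs words
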